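-- pv_equiv track=rewrite | github.com/Daethyra/OpenDTS | db_manager.py | flag_dangerous_users
-- ===== SOURCE A (Python) =====
-- import itertools
--
-- def flag_dangerous_users(usernames, tweets, violence_intentions, threshold):
--     dangerous_users = []
--     tweet_violence_intentions = list(zip(usernames, tweets, violence_intentions))
--
--     for user, grouped_tweets in itertools.groupby(sorted(tweet_violence_intentions, key=lambda x: x[0]), key=lambda x: x[0]):
--         violent_tweets = sum(1 for tweet in grouped_tweets if tweet[2] == "Violent")
--         if violent_tweets >= threshold:
--             dangerous_users.append(user)
--
--     return dangerous_users
-- ===== SOURCE B (Python) =====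
-- def flag_dangerous_users(usernames, tweets, violence_intentions, threshold):
--     counts = {}
--     for user, _tweet, intention in zip(usernames, tweets, violence_intentions):
--         counts[user] = counts.get(user, 0) + (1 if intention == "Violent" else 0)
--     return sorted(user for user, c in counts.items() if c >= threshold)
-- ===== Notes on version B (the rewrite author's own statement) =====
-- stated objective: alternative
-- what changed: Replaces the global sort of all (user,tweet,intention) triples followed by itertools.groupby counting with a single-pass dict of per-user violent counts (every user seen gets an entry, even 0) and a final sort of only the flagged usernames.
import Mathlib
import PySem

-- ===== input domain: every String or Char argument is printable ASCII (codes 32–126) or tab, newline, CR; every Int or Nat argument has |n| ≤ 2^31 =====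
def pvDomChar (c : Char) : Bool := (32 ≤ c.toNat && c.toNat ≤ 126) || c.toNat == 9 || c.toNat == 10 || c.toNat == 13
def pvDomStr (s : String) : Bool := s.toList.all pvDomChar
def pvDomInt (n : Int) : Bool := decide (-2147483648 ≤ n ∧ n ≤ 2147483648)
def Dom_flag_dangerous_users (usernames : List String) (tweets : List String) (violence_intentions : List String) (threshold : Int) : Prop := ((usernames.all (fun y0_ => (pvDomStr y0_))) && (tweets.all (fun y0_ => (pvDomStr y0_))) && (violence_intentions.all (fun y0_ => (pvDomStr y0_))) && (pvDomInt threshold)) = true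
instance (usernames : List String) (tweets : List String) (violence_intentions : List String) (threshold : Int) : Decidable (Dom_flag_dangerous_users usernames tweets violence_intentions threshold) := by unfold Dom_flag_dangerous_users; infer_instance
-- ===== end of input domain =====

-- B replaces A's global sort of all triples + itertools.groupby counting by a one-pass
-- per-user dict of violent-tweet counts (every user seen gets an entry, even 0) followed
-- by a sort of the flagged usernames only; return values only, neither mutates its arguments.

-- ===== PORT A =====
-- itertools.groupby over a list with key = first component: maximal runs of equal keys.
def pvGroupByFst (l : List (String × String × String)) : List (String × List (String × String × String)) :=
  match l with
  | [] => []
  | x :: xs =>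
      (x.1, x :: xs.takeWhile (fun y => y.1 == x.1)) ::
        pvGroupByFst (xs.dropWhile (fun y => y.1 == x.1))
termination_by l.length
decreasing_by
  simpa using Nat.lt_succ_of_le (List.length_dropWhile_le (fun y => y.1 == x.1) xs)

def flag_dangerous_users (usernames : List String) (tweets : List String) (violence_intentions : List String) (threshold : Int) : List String :=
  let tweet_violence_intentions := usernames.zip (tweets.zip violence_intentions)
  (pvGroupByFst (PySem.List.sorted tweet_violence_intentions (fun x => x.1) false)).foldl
    (fun dangerous_users g =>
      let violent_tweets : Int := g.2.foldl (fun s t => if t.2.2 == "Violent" then s + 1 else s) 0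
      if threshold ≤ violent_tweets then dangerous_users ++ [g.1] else dangerous_users) []

-- ===== PORT B =====
def flag_dangerous_users_alt (usernames : List String) (tweets : List String) (violence_intentions : List String) (threshold : Int) : List String :=
  let counts := (usernames.zip (tweets.zip violence_intentions)).foldl
    (fun d t => d.modify t.1 0 (fun c => c + (if t.2.2 == "Violent" then 1 else 0)))
    (PySem.Dict.empty : PySem.Dict String Int)
  PySem.List.sorted ((counts.items.filter (fun kv => threshold ≤ kv.2)).map (fun kv => kv.1)) (fun u => u) false

-- ===== PRECONDITION & SPEC =====
def Spec_flag_dangerous_users (usernames : List String) (tweets : List String) (violence_intentions : List String) (threshold : Int) (out : List String) : Prop := out = flag_dangerous_users_alt usernames tweets violence_intentions threshold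
instance (usernames : List String) (tweets : List String) (violence_intentions : List String) (threshold : Int) (out : List String) : Decidable (Spec_flag_dangerous_users usernames tweets violence_intentions threshold out) := by unfold Spec_flag_dangerous_users; infer_instance

-- ===== CLAIM (what is proved, stated in full; the proofs are below) =====
def Claim_equal_flag_dangerous_users : Prop := ∀ (usernames : List String) (tweets : List String) (violence_intentions : List String) (threshold : Int), Dom_flag_dangerous_users usernames tweets violence_intentions threshold → Spec_flag_dangerous_users usernames tweets violence_intentions threshold (flag_dangerous_users usernames tweets violence_intentions threshold)

-- ===== LEMMAS AND PROOFS =====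

-- every element dropped past the first run of a sorted-by-fst list has a strictly larger key
theorem pv_drop_gt (x : String × String × String) (xs : List (String × String × String))
    (h : ((x :: xs)).Pairwise (fun a b => a.1 ≤ b.1)) :
    ∀ t ∈ xs.dropWhile (fun y => y.1 == x.1), x.1 < t.1 := by
  intro t ht
  set p := (fun y : String × String × String => y.1 == x.1) with hp
  cases e : xs.dropWhile p with
  | nil => rw [e] at ht; simp at ht
  | cons y ys =>
    rw [e] at ht
    have hxs : ∀ b ∈ xs, x.1 ≤ b.1 := (List.pairwise_cons.1 h).1
    have hsub : (xs.dropWhile p).Sublist xs := List.dropWhile_sublist p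
    have hne : xs.dropWhile p ≠ [] := by rw [e]; simp
    have hy_ne : p ((xs.dropWhile p).head hne) = false := by
      simpa using List.head_dropWhile_not p hne
    have hy_ne' : (y.1 == x.1) = false := by
      have : (xs.dropWhile p).head hne = y := by simp [e]
      rw [this] at hy_ne; exact hy_ne
    have hy_mem : y ∈ xs := hsub.subset (by rw [e]; exact List.mem_cons_self)
    have hxy : x.1 < y.1 :=
      lt_of_le_of_ne (hxs y hy_mem) (by intro hEq; rw [← hEq] at hy_ne'; simp at hy_ne')
    rcases List.mem_cons.1 ht with rfl | hty
    · exact hxy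
    · have hpxs : xs.Pairwise (fun a b => a.1 ≤ b.1) := (List.pairwise_cons.1 h).2
      have hpd : (xs.dropWhile p).Pairwise (fun a b => a.1 ≤ b.1) := hpxs.sublist hsub
      rw [e] at hpd
      exact lt_of_lt_of_le hxy ((List.pairwise_cons.1 hpd).1 t hty)

-- the group keys are exactly the keys occurring in the list
theorem pv_group_keys_mem (l : List (String × String × String)) (k : String) :
    k ∈ (pvGroupByFst l).map (fun g => g.1) ↔ k ∈ l.map (fun t => t.1) := by
  induction l using pvGroupByFst.induct with
  | case1 => simp [pvGroupByFst]
  | case2 x xs ih =>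
    rw [pvGroupByFst]
    simp only [List.map_cons, List.mem_cons, ih]
    constructor
    · rintro (rfl | hk)
      · exact Or.inl rfl
      · simp only [List.mem_map] at hk ⊢
        obtain ⟨t, ht, rfl⟩ := hk
        exact Or.inr ⟨t, (List.dropWhile_sublist _).subset ht, rfl⟩
    · rintro (rfl | hk)
      · exact Or.inl rfl
      · simp only [List.mem_map] at hk ⊢
        obtain ⟨t, ht, rfl⟩ := hk
        rw [← List.takeWhile_append_dropWhile (p := fun y => y.1 == x.1) (l := xs)] at ht
        rcases List.mem_append.1 ht with h1 | h2
        · have h1' : ((fun y : String × String × String => y.1 == x.1) t) = true :=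
            List.mem_takeWhile_imp (p := fun y : String × String × String => y.1 == x.1) h1
          simp only [beq_iff_eq] at h1'
          exact Or.inl h1'
        · exact Or.inr ⟨t, h2, rfl⟩

-- each group of a sorted-by-fst list holds exactly the elements with its key
theorem pv_group_content (l : List (String × String × String))
    (h : l.Pairwise (fun a b => a.1 ≤ b.1)) :
    ∀ k g, (k, g) ∈ pvGroupByFst l → g = l.filter (fun t => t.1 == k) := by
  induction l using pvGroupByFst.induct with
  | case1 => simp [pvGroupByFst]
  | case2 x xs ih =>
    intro k g hm
    have hdrop := pv_drop_gt x xs h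
    have hxs : xs.Pairwise (fun a b => a.1 ≤ b.1) := (List.pairwise_cons.1 h).2
    have hrest : (xs.dropWhile (fun y => y.1 == x.1)).Pairwise (fun a b => a.1 ≤ b.1) :=
      hxs.sublist (List.dropWhile_sublist _)
    rw [pvGroupByFst] at hm
    rcases List.mem_cons.1 hm with he | ht
    · have hk : k = x.1 := congrArg Prod.fst he
      have hg : g = x :: xs.takeWhile (fun y => y.1 == x.1) := congrArg Prod.snd he
      subst hk; subst hg
      have h2 : (xs.dropWhile (fun y => y.1 == x.1)).filter (fun t => t.1 == x.1) = [] := by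
        rw [List.filter_eq_nil_iff]
        intro a ha
        have := hdrop a ha
        simp only [beq_iff_eq]
        exact (ne_of_lt this).symm
      have h3 : (xs.takeWhile (fun y => y.1 == x.1)).filter (fun t => t.1 == x.1)
          = xs.takeWhile (fun y => y.1 == x.1) := by
        rw [List.filter_eq_self]
        intro a ha
        exact List.mem_takeWhile_imp (p := fun y : String × String × String => y.1 == x.1) ha
      conv_rhs => rw [← List.takeWhile_append_dropWhile (p := fun y => y.1 == x.1) (l := xs)]
      rw [List.filter_cons, List.filter_append, h2, h3]
      simp
    · have hg := ih hrest k g ht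
      have hkmem : k ∈ (xs.dropWhile (fun y => y.1 == x.1)).map (fun t => t.1) := by
        have := pv_group_keys_mem (xs.dropWhile (fun y => y.1 == x.1)) k
        exact this.1 (List.mem_map.2 ⟨(k, g), ht, rfl⟩)
      obtain ⟨t, htm, htk⟩ := List.mem_map.1 hkmem
      have hxk : x.1 < k := htk ▸ hdrop t htm
      rw [hg]
      rw [← List.takeWhile_append_dropWhile (p := fun y => y.1 == x.1) (l := xs)]
      rw [List.filter_cons, List.filter_append]
      have h1 : (x.1 == k) = false := by
        simp only [beq_eq_false_iff_ne]; exact ne_of_lt hxk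
      have h2 : (xs.takeWhile (fun y => y.1 == x.1)).filter (fun t => t.1 == k) = [] := by
        rw [List.filter_eq_nil_iff]
        intro a ha
        have : ((fun y : String × String × String => y.1 == x.1) a) = true :=
          List.mem_takeWhile_imp (p := fun y : String × String × String => y.1 == x.1) ha
        simp only [beq_iff_eq] at this ⊢
        rw [this]; exact ne_of_lt hxk
      simp [h1, h2]

-- the group keys of a sorted-by-fst list are strictly increasing
theorem pv_group_keys_lt (l : List (String × String × String))
    (h : l.Pairwise (fun a b => a.1 ≤ b.1)) :
    ((pvGroupByFst l).map (fun g => g.1)).Pairwise (· < ·) := by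
  induction l using pvGroupByFst.induct with
  | case1 => simp [pvGroupByFst]
  | case2 x xs ih =>
    have hxs : xs.Pairwise (fun a b => a.1 ≤ b.1) := (List.pairwise_cons.1 h).2
    have hrest : (xs.dropWhile (fun y => y.1 == x.1)).Pairwise (fun a b => a.1 ≤ b.1) :=
      hxs.sublist (List.dropWhile_sublist _)
    rw [pvGroupByFst]
    simp only [List.map_cons]
    refine List.pairwise_cons.2 ⟨?_, ih hrest⟩
    intro k hk
    obtain ⟨t, htm, htk⟩ := List.mem_map.1 ((pv_group_keys_mem _ k).1 hk)
    exact htk ▸ pv_drop_gt x xs h t htm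

-- B's counting fold computes each user's violent-tweet count
theorem pv_getD_fold (l : List (String × String × String)) (d : PySem.Dict String Int) (k : String) :
    (l.foldl (fun d t => d.modify t.1 0 (fun c => c + (if t.2.2 == "Violent" then 1 else 0))) d).getD k 0
      = d.getD k 0 + (l.countP (fun t => t.2.2 == "Violent" && t.1 == k) : Int) := by
  induction l generalizing d with
  | nil => simp
  | cons t ts ih =>
    rw [List.foldl_cons, ih, PySem.Dict.getD_modify, List.countP_cons]
    by_cases hk : k = t.1
    · subst hk
      by_cases hv : t.2.2 = "Violent"
      · simp [hv]; ring
      · simp [hv]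
    · simp only [if_neg hk]
      have : (t.1 == k) = false := by
        simp only [beq_eq_false_iff_ne]; exact fun e => hk e.symm
      simp [this]

-- ===== VERDICT (by name: the statement is the Claim_ definition above) =====
theorem flag_dangerous_users_spec : Claim_equal_flag_dangerous_users := by
  intro usernames tweets violence_intentions threshold _
  unfold Spec_flag_dangerous_users flag_dangerous_users flag_dangerous_users_alt
  set tvi := usernames.zip (tweets.zip violence_intentions) with htvi
  set L := PySem.List.sorted tvi (fun x => x.1) false with hLdef
  have hL : L.Pairwise (fun a b => a.1 ≤ b.1) := PySem.List.sorted_pairwise ..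
  set cnt : String → Int := fun k => (tvi.countP (fun t => t.2.2 == "Violent" && t.1 == k) : Int) with hcnt
  set bq : String → Bool := fun k => decide (threshold ≤ cnt k) with hbq
  set K := (pvGroupByFst L).map (fun g => g.1) with hK
  -- ===== A's side: filter the strictly increasing group-key list =====
  have hAfold :
      (pvGroupByFst L).foldl
        (fun dangerous_users g =>
          let violent_tweets : Int := g.2.foldl (fun s t => if t.2.2 == "Violent" then s + 1 else s) 0
          if threshold ≤ violent_tweets then dangerous_users ++ [g.1] else dangerous_users) []
      = K.filter bq := by
    rw [PySem.List.foldl_append_ite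
        (p := fun g : String × List (String × String × String) =>
          threshold ≤ g.2.foldl (fun s t => if t.2.2 == "Violent" then s + 1 else s) 0)
        (f := fun g => g.1)]
    rw [List.nil_append]
    have hfc : (pvGroupByFst L).filter
        (fun g => decide (threshold ≤ g.2.foldl (fun s t => if t.2.2 == "Violent" then s + 1 else s) 0))
        = (pvGroupByFst L).filter (fun g => bq g.1) := by
      apply List.filter_congr
      intro g hg
      have hcontent : g.2 = L.filter (fun t => t.1 == g.1) :=
        pv_group_content L hL g.1 g.2 hg
      have hsum : g.2.foldl (fun s t => if t.2.2 == "Violent" then s + 1 else s) 0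
          = cnt g.1 := by
        rw [PySem.List.foldl_if_add_one, hcontent, List.countP_filter, hcnt]
        have := (PySem.List.sorted_perm (xs := tvi) (key := fun x => x.1) (rev := false)).countP_eq
          (p := fun t : String × String × String => t.2.2 == "Violent" && t.1 == g.1)
        simp only [← hLdef] at this
        simp [this]
      rw [hsum, hbq]
    rw [hfc, hK, List.filter_map]
    try rfl
    try simp [Function.comp_def]
  -- ===== B's side =====
  set counts := tvi.foldl
      (fun d t => d.modify t.1 0 (fun c => c + (if t.2.2 == "Violent" then 1 else 0)))
      (PySem.Dict.empty : PySem.Dict String Int) with hcounts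
  have hkeys : counts.keys = PySem.Set.ofList (tvi.map (fun t => t.1)) := by
    rw [hcounts, PySem.Dict.keys_foldl_modify_key
      (key := fun t : String × String × String => t.1)
      (f := fun d (t : String × String × String) => fun c => c + (if t.2.2 == "Violent" then 1 else 0))]
    simp [PySem.Set.update_nil_left]
  have hnodup : counts.keys.Nodup := by
    rw [hkeys]; exact PySem.Set.nodup_ofList _
  have hgetD : ∀ k, counts.getD k 0 = cnt k := by
    intro k
    rw [hcounts, pv_getD_fold]
    simp [hcnt]
  have hBlist : (counts.items.filter (fun kv => threshold ≤ kv.2)).map (fun kv => kv.1)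
      = (PySem.Set.ofList (tvi.map (fun t => t.1))).filter bq := by
    rw [PySem.Dict.items_eq_map_keys counts hnodup 0, List.filter_map, List.map_map]
    simp only [Function.comp_def]
    have h1 : (fun k => decide (threshold ≤ ((k, counts.getD k 0) : String × Int).2)) = bq := by
      funext k; rw [hbq]; simp [hgetD k]
    rw [h1, hkeys]
    simp
  -- ===== combine the two sides =====
  rw [hAfold]
  show List.filter bq K
      = PySem.List.sorted ((counts.items.filter (fun kv => decide (threshold ≤ kv.2))).map (fun kv => kv.1)) (fun u => u) false
  rw [hBlist]
  have hKnodup : K.Nodup := (pv_group_keys_lt L hL).imp (fun h => ne_of_lt h)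
  have hSnodup : (PySem.Set.ofList (tvi.map (fun t => t.1))).Nodup := PySem.Set.nodup_ofList _
  have hmem : ∀ a, a ∈ K ↔ a ∈ PySem.Set.ofList (tvi.map (fun t => t.1)) := by
    intro a
    rw [hK, pv_group_keys_mem, PySem.Set.mem_ofList]
    exact ((PySem.List.sorted_perm (xs := tvi) (key := fun x => x.1) (rev := false)).map
      (fun t : String × String × String => t.1)).mem_iff
  have hKS : K.Perm (PySem.Set.ofList (tvi.map (fun t => t.1))) :=
    (List.perm_ext_iff_of_nodup hKnodup hSnodup).2 hmem
  have hpair : (K.filter bq).Pairwise (fun a b => a < b) :=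
    (pv_group_keys_lt L hL).sublist List.filter_sublist
  exact (PySem.List.sorted_eq_of_perm_of_pairwise_lt _ _ (fun u : String => u) (hKS.filter bq) hpair).symm
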